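-- pv_equiv track=rewrite | github.com/carloshoyos/euler-a-day | python/079.py | matchesAllRules
-- ===== SOURCE A (Python) =====
-- def matchesAllRules(passcode, rules):
--     for rule in rules:
--         pos = 0
--         for d in rule:
--             posnext = passcode.find(d)
--             if posnext < pos: return False
--             pos = posnext
--
--     return True
-- ===== SOURCE B (Python) =====
-- def matchesAllRules(passcode, rules):
--     for rule in rules:
--         positions = [0] + [passcode.find(d) for d in rule]
--         if positions != sorted(positions):
--             return False
--     return True
-- ===== Notes on version B (the rewrite author's own statement) =====
-- stated objective: idiomatic
-- what changed: B builds, per rule, the full list of first-occurrence indices prefixed by 0 and tests monotonicity by comparing it with its sorted copy, instead of A's incremental scan with a running position variable.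
import Mathlib
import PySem

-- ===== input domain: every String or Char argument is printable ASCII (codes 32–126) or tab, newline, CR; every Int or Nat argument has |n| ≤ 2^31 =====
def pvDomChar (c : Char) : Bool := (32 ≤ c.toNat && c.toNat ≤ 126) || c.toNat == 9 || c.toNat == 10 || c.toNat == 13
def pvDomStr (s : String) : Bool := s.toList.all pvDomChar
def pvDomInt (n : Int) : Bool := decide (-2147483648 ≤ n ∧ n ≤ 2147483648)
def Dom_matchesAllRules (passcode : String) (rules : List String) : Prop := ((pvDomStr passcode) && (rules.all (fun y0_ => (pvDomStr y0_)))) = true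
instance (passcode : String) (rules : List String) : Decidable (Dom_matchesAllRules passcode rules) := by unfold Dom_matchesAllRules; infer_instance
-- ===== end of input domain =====

-- B tests each rule by comparing the list of first-occurrence indices (prefixed by 0)
-- with its sorted copy, instead of A's incremental running-position scan (objective: idiomatic).

-- ===== PORT A =====
-- inner loop of A: running position `pos`, early return False on a decrease
def pvAInner (passcode : String) : List Char → Int → Bool
  | [], _ => true
  | d :: ds, pos =>
    let posnext := PySem.Str.find passcode (String.ofList [d])
    if posnext < pos then false else pvAInner passcode ds posnext

def matchesAllRules (passcode : String) (rules : List String) : Bool :=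
  match rules with
  | [] => true
  | rule :: rest =>
    if pvAInner passcode rule.toList 0 then matchesAllRules passcode rest else false

-- ===== PORT B =====
def pvBRule (passcode : String) (rule : String) : Bool :=
  let positions : List Int :=
    0 :: rule.toList.map (fun d => PySem.Str.find passcode (String.ofList [d]))
  positions == PySem.List.sorted positions (fun x => x) false

def matchesAllRules_alt (passcode : String) (rules : List String) : Bool :=
  match rules with
  | [] => true
  | rule :: rest =>
    if pvBRule passcode rule then matchesAllRules_alt passcode rest else false

-- ===== PRECONDITION & SPEC =====
def Spec_matchesAllRules (passcode : String) (rules : List String) (out : Bool) : Prop := out = matchesAllRules_alt passcode rules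
instance (passcode : String) (rules : List String) (out : Bool) : Decidable (Spec_matchesAllRules passcode rules out) := by unfold Spec_matchesAllRules; infer_instance

-- ===== CLAIM (what is proved, stated in full; the proofs are below) =====
def Claim_equal_matchesAllRules : Prop := ∀ (passcode : String) (rules : List String), Dom_matchesAllRules passcode rules → Spec_matchesAllRules passcode rules (matchesAllRules passcode rules)

-- ===== LEMMAS AND PROOFS =====

-- A's inner loop succeeds iff the running positions form a nondecreasing chain
theorem pvAInner_iff_chain (passcode : String) (ds : List Char) (pos : Int) :
    pvAInner passcode ds pos = true ↔
      List.IsChain (· ≤ ·) (pos :: ds.map (fun d => PySem.Str.find passcode (String.ofList [d]))) := by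
  induction ds generalizing pos with
  | nil => simp [pvAInner]
  | cons d ds ih =>
    simp only [pvAInner, List.map_cons, List.isChain_cons_cons]
    split_ifs with h
    · simp only [false_iff]
      intro hc; omega
    · rw [ih]; constructor
      · intro hc; exact ⟨by omega, hc⟩
      · intro hc; exact hc.2

theorem pvBRule_iff_chain (passcode : String) (rule : String) :
    pvBRule passcode rule = true ↔
      List.IsChain (· ≤ ·) ((0 : Int) :: rule.toList.map (fun d => PySem.Str.find passcode (String.ofList [d]))) := by
  unfold pvBRule
  rw [beq_iff_eq, List.isChain_iff_pairwise]
  constructor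
  · intro h; rw [h]
    exact PySem.List.sorted_pairwise _ _
  · intro h
    exact (PySem.List.sorted_eq_self_of_pairwise _ _ h).symm

theorem pvRule_eq (passcode : String) (rule : String) :
    pvAInner passcode rule.toList 0 = pvBRule passcode rule := by
  have := (pvAInner_iff_chain passcode rule.toList 0).trans (pvBRule_iff_chain passcode rule).symm
  cases h1 : pvAInner passcode rule.toList 0 <;> cases h2 : pvBRule passcode rule <;>
    simp_all

-- ===== VERDICT (by name: the statement is the Claim_ definition above) =====
theorem pvMain (passcode : String) (rules : List String) :
    matchesAllRules passcode rules = matchesAllRules_alt passcode rules := by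
  induction rules with
  | nil => rfl
  | cons r rs ih =>
    simp only [matchesAllRules, matchesAllRules_alt, pvRule_eq, ih]

-- ===== VERDICT2 =====
theorem matchesAllRules_spec : Claim_equal_matchesAllRules := by
  intro passcode rules _
  exact pvMain passcode rules
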